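-- pv_equiv track=rewrite | github.com/richbon75/practice | advent_of_code_2015/a25_let_it_snow.py | code_value
-- ===== SOURCE A (Python) =====
-- def code_value(code):
--     if code < 1:
--         return None
--     current_code = 1
--     current_value = 20151125
--     while current_code < code:
--         current_code += 1
--         current_value = (current_value * 252533) % 33554393
--     return current_value
-- ===== SOURCE B (Python) =====
-- def code_value(code):
--     if code < 1:
--         return None
--     M = 33554393
--     e = code - 1
--     result = 1
--     base = 252533
--     while e > 0:
--         if e & 1:
--             result = result * base % M
--         base = base * base % M
--         e >>= 1
--     return 20151125 * result % M
-- ===== Notes on version B (the rewrite author's own statement) =====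
-- stated objective: faster
-- what changed: Replaces the O(code) repeated modular multiplication loop with exponentiation by squaring (O(log code)), computing 20151125 * 252533^(code-1) mod 33554393.
import Mathlib
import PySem

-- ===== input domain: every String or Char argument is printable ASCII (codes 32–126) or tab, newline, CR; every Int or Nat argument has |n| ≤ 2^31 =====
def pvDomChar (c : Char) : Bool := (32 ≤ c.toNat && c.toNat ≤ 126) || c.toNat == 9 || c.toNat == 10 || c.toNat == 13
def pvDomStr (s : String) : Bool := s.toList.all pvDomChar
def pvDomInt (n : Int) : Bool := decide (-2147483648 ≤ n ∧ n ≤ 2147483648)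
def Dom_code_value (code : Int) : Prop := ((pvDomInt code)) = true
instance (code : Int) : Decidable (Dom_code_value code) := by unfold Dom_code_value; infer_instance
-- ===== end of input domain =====

-- B replaces A's O(code) repeated-multiplication loop with exponentiation by squaring (O(log code)).

-- ===== PORT A =====
-- the while loop: runs once per increment of current_code, i.e. (code - 1) times when code ≥ 1.
-- PySem.Int.mod is Python's %, exact for the positive divisor 33554393.
def codeLoopA : Nat → Int → Int
  | 0, v => v
  | n + 1, v => codeLoopA n (PySem.Int.mod (v * 252533) 33554393)

def code_value (code : Int) : Option Int :=
  if code < 1 then none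
  else some (codeLoopA (code - 1).toNat 20151125)

-- ===== PORT B =====
-- Source B's while loop on e, r(esult), b(ase); Python's % on a positive modulus equals Int.emod, so '%' is exact here.
def powLoopB (e : Nat) (r b : Int) : Int :=
  if h : e = 0 then r
  else powLoopB (e / 2) (if e % 2 = 1 then r * b % 33554393 else r) (b * b % 33554393)
  termination_by e
  decreasing_by exact Nat.div_lt_self (Nat.pos_of_ne_zero h) (by norm_num)

def code_value_alt (code : Int) : Option Int :=
  if code < 1 then none
  else some (20151125 * powLoopB (code - 1).toNat 1 252533 % 33554393)

-- ===== PRECONDITION & SPEC =====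
def Spec_code_value (code : Int) (out : Option Int) : Prop := out = code_value_alt code
instance (code : Int) (out : Option Int) : Decidable (Spec_code_value code out) := by unfold Spec_code_value; infer_instance

-- ===== CLAIM (what is proved, stated in full; the proofs are below) =====
def Claim_equal_code_value : Prop := ∀ (code : Int), Dom_code_value code → Spec_code_value code (code_value code)

-- ===== LEMMAS AND PROOFS =====

theorem mulmod_left (a b n : Int) : a % n * b % n = a * b % n := by
  rw [Int.mul_emod, Int.emod_emod_of_dvd _ dvd_rfl, ← Int.mul_emod]

theorem mulmod_right (a b n : Int) : a * (b % n) % n = a * b % n := by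
  rw [Int.mul_emod, Int.emod_emod_of_dvd _ dvd_rfl, ← Int.mul_emod]

theorem powmod (a n : Int) (k : Nat) : (a % n) ^ k % n = a ^ k % n := by
  induction k with
  | zero => simp
  | succ k ih =>
    rw [pow_succ, Int.mul_emod, ih, Int.emod_emod_of_dvd _ dvd_rfl,
        ← Int.mul_emod, ← pow_succ]

theorem codeLoopA_closed (n : Nat) : ∀ v : Int, 0 ≤ v → v < 33554393 →
    codeLoopA n v = v * 252533 ^ n % 33554393 := by
  induction n with
  | zero =>
    intro v h0 h1
    simp [codeLoopA]
    omega
  | succ n ih =>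
    intro v h0 h1
    have hmod : PySem.Int.mod (v * 252533) 33554393 = v * 252533 % 33554393 :=
      PySem.Int.mod_eq_emod_of_pos (by norm_num)
    rw [codeLoopA, hmod, ih _ (Int.emod_nonneg _ (by norm_num))
        (Int.emod_lt_of_pos _ (by norm_num)), mulmod_left]
    congr 1
    ring

theorem powLoopB_mod (e : Nat) : ∀ r b : Int,
    powLoopB e r b % 33554393 = r * b ^ e % 33554393 := by
  induction e using Nat.strong_induction_on with
  | _ e ih =>
    intro r b
    by_cases h : e = 0
    · subst h; simp [powLoopB]
    · rw [powLoopB]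
      simp only [h, dif_neg, not_false_iff]
      rw [ih (e / 2) (Nat.div_lt_self (Nat.pos_of_ne_zero h) (by norm_num))]
      have hpow : (b * b) ^ (e / 2) * b ^ (e % 2) = b ^ e := by
        rw [← pow_two, ← pow_mul, ← pow_add, Nat.div_add_mod]
      by_cases hpar : e % 2 = 1
      · simp only [hpar, if_pos]
        rw [Int.mul_emod, powmod, Int.emod_emod_of_dvd _ dvd_rfl,
            ← Int.mul_emod, ← hpow, hpar, pow_one]
        ring_nf
      · have hpar0 : e % 2 = 0 := by omega
        simp only [hpar, if_neg, not_false_iff]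
        rw [Int.mul_emod, powmod, ← Int.mul_emod, ← hpow, hpar0, pow_zero, mul_one]

-- ===== VERDICT (by name: the statement is the Claim_ definition above) =====
theorem code_value_spec : Claim_equal_code_value := by
  intro code _
  unfold Spec_code_value code_value code_value_alt
  by_cases h : code < 1
  · simp [h]
  · simp only [h, if_neg, not_false_iff, Option.some.injEq]
    rw [codeLoopA_closed _ 20151125 (by norm_num) (by norm_num),
        ← mulmod_right 20151125 (powLoopB _ 1 252533), powLoopB_mod, one_mul,
        mulmod_right]
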